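-- pv_equiv track=rewrite | github.com/HilaryHe1012/LecInfo | egg_drop.py | total_bitstrings_tp
-- ===== SOURCE A (Python) =====
-- def total_bitstrings_tp(n, k, memo={}):
--     m = 0
--     if n < k:
--         return 2**n
--     if (n,k) in memo:
--         return memo[(n,k)]
--     m = 0
--     for i in range(k):
--         m += total_bitstrings_tp(n-i-1, k, memo)
--     return m
-- ===== SOURCE B (Python) =====
-- def total_bitstrings_tp(n, k, memo={}):
--     if n < k:
--         return 2 ** n
--     if (n, k) in memo:
--         return memo[(n, k)]
--     if k <= 0:
--         return 0
--     vals = []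
--     s = 0  # running sum of the last (at most k) entries of vals
--     for m in range(n + 1):
--         if m < k:
--             v = 2 ** m
--         else:
--             v = memo.get((m, k), s)
--         vals.append(v)
--         s += v
--         if m >= k:
--             s -= vals[m - k]
--     return vals[n]
-- ===== Notes on version B (the rewrite author's own statement) =====
-- stated objective: alternative
-- what changed: A's top-down recursion (whose memo argument is read but never written) is replaced by a bottom-up table filled for m = 0..n with a sliding-window running sum, each entry taken from the caller-supplied memo or the sum of the previous k entries.
-- outside the precondition, e.g. on total_bitstrings_tp(-1, 0, {}): A returns 0.5, B returns 0.5; on total_bitstrings_tp(997, 1, {}): A returns 1, B returns 1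
import Mathlib
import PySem

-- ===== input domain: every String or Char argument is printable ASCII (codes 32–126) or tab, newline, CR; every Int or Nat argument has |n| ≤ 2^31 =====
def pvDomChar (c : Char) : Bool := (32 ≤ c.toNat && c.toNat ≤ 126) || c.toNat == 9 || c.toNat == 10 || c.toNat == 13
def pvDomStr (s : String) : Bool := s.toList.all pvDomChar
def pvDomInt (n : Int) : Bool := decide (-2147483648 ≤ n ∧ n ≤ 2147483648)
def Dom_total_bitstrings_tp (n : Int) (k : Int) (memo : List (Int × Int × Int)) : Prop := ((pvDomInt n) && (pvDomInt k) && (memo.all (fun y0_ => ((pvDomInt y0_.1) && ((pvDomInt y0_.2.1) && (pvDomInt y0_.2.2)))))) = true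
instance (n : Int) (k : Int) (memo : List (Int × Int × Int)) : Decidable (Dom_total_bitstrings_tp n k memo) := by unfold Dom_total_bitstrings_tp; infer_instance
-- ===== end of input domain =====

-- B replaces A's top-down recursion (its memo argument is read but never written) by a
-- bottom-up sliding-window table for m = 0..n (objective: alternative algorithm, same values).

-- ===== PORT A =====
-- memo lookup `(n,k) in memo` / `memo[(n,k)]`: first triple whose first two components match
def pvMemoGet? (memo : List (Int × Int × Int)) (n k : Int) : Option Int :=
  (memo.find? (fun t => t.1 == n && t.2.1 == k)).map (fun t => t.2.2)

def total_bitstrings_tp (n : Int) (k : Int) (memo : List (Int × Int × Int)) : Int :=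
  if _h : n < k then 2 ^ n.toNat
  else
    match pvMemoGet? memo n k with
    | some v => v
    | none =>
      -- for i in range(k): m += total_bitstrings_tp(n-i-1, k, memo)
      (List.range k.toNat).attach.foldl
        (fun m i => m + total_bitstrings_tp (n - i.1 - 1) k memo) 0
termination_by (n - k + 1).toNat
decreasing_by
  have := List.mem_range.mp i.2
  omega

-- ===== PORT B =====
-- vals[m - k] is in range whenever it is read (k ≤ m ≤ len(vals)-1); PySem.List.pyGet? is exact there
def total_bitstrings_tp_alt (n : Int) (k : Int) (memo : List (Int × Int × Int)) : Int :=
  if n < k then 2 ^ n.toNat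
  else
    match pvMemoGet? memo n k with
    | some v => v
    | none =>
      if k ≤ 0 then 0
      else
        let st := (List.range (n + 1).toNat).foldl
          (fun (st : List Int × Int) (m : Nat) =>
            let v : Int := if (m : Int) < k then (2 : Int) ^ m
                           else (pvMemoGet? memo (m : Int) k).getD st.2
            let vals := st.1 ++ [v]
            let s := st.2 + v
            let s := if k ≤ (m : Int) then s - (PySem.List.pyGet? vals ((m : Int) - k)).getD 0 else s
            (vals, s)) ([], 0)
        st.1.getD n.toNat 0

-- ===== PRECONDITION & SPEC =====
-- Pre_ excludes (a) n < 0 with n < k, where Python A evaluates 2**n with a negative exponent and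
-- returns a float (e.g. 0.5), not a value of the declared int type, and (b) the RecursionError
-- region: k ≥ 1 with no memo hit at (n,k), where A's call chain n, n-1, ... uses n-k+2 stack
-- frames (cut to n-m+1 by a memo entry at (m,k) on the chain, exact for k = 1) and overflows
-- CPython's default 1000-frame limit near n-k = 997; the bound 950 carries a small margin for
-- the frames the calling harness itself occupies, so a thin band of returning inputs such as
-- (997, 1, {}) is excluded with it (see cites).
def Pre_total_bitstrings_tp (n : Int) (k : Int) (memo : List (Int × Int × Int)) : Prop :=
  (0 ≤ n ∨ k ≤ n) ∧
  (n < k ∨ k ≤ 0 ∨ (memo.any (fun t => t.1 == n && t.2.1 == k)) = true ∨ n - k ≤ 950 ∨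
    (k = 1 ∧ (memo.any (fun t => t.2.1 == 1 && 1 ≤ t.1 && t.1 ≤ n && n - t.1 ≤ 950)) = true))
instance (n : Int) (k : Int) (memo : List (Int × Int × Int)) : Decidable (Pre_total_bitstrings_tp n k memo) := by unfold Pre_total_bitstrings_tp; infer_instance

def pvWitness_total_bitstrings_tp : Int × Int × (List (Int × Int × Int)) := (5, 2, [(3, 2, 7)])

def Spec_total_bitstrings_tp (n : Int) (k : Int) (memo : List (Int × Int × Int)) (out : Int) : Prop := out = total_bitstrings_tp_alt n k memo
instance (n : Int) (k : Int) (memo : List (Int × Int × Int)) (out : Int) : Decidable (Spec_total_bitstrings_tp n k memo out) := by unfold Spec_total_bitstrings_tp; infer_instance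

-- ===== CLAIM (what is proved, stated in full; the proofs are below) =====
def Claim_equal_total_bitstrings_tp : Prop := ∀ (n : Int) (k : Int) (memo : List (Int × Int × Int)), Dom_total_bitstrings_tp n k memo → Pre_total_bitstrings_tp n k memo → Spec_total_bitstrings_tp n k memo (total_bitstrings_tp n k memo)

-- ===== LEMMAS AND PROOFS =====

theorem pv_sum_map_range' (f : Nat → Int) : ∀ (c a : Nat),
    ((List.range' a c).map f).sum = ∑ i ∈ Finset.range c, f (a + i) := by
  intro c
  induction c with
  | zero => intro a; simp
  | succ c ih =>
      intro a
      rw [List.range'_succ, List.map_cons, List.sum_cons, ih, Finset.sum_range_succ']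
      simp only [Nat.add_zero]
      rw [add_comm]
      congr 1
      apply Finset.sum_congr rfl
      intro i _
      congr 1
      omega

-- A's loop, rewritten as a Finset sum
theorem totalA_eq_sum (n k : Int) (memo : List (Int × Int × Int))
    (hnk : ¬ n < k) (hmemo : pvMemoGet? memo n k = none) :
    total_bitstrings_tp n k memo
      = ∑ i ∈ Finset.range k.toNat, total_bitstrings_tp (n - i - 1) k memo := by
  rw [total_bitstrings_tp]
  simp only [hnk, dite_false, hmemo]
  rw [List.foldl_attach (l := List.range k.toNat)
      (f := fun (m : Int) (i : Nat) => m + total_bitstrings_tp (n - i - 1) k memo)]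
  have hfold : ∀ (l : List Nat) (a : Int),
      List.foldl (fun (m : Int) (i : Nat) => m + total_bitstrings_tp (n - i - 1) k memo) a l
        = a + (l.map (fun (i : Nat) => total_bitstrings_tp (n - i - 1) k memo)).sum := by
    intro l
    induction l with
    | nil => intro a; simp
    | cons x xs ih => intro a; simp [ih, add_assoc]
  rw [hfold, List.range_eq_range', pv_sum_map_range']
  simp

theorem totalA_memo (n k : Int) (memo : List (Int × Int × Int)) (v : Int)
    (hnk : ¬ n < k) (hmemo : pvMemoGet? memo n k = some v) :
    total_bitstrings_tp n k memo = v := by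
  rw [total_bitstrings_tp]
  simp [hnk, hmemo]

theorem totalA_base (n k : Int) (memo : List (Int × Int × Int)) (hnk : n < k) :
    total_bitstrings_tp n k memo = 2 ^ n.toNat := by
  rw [total_bitstrings_tp]
  simp [hnk]

-- B's fold builds the table of A's values together with the running window sum
theorem vals_invariant (k : Int) (memo : List (Int × Int × Int)) (hk : 0 < k) (j : Nat) :
    (List.range j).foldl
        (fun (st : List Int × Int) (m : Nat) =>
          let v : Int := if (m : Int) < k then (2 : Int) ^ m
                         else (pvMemoGet? memo (m : Int) k).getD st.2
          let vals := st.1 ++ [v]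
          let s := st.2 + v
          let s := if k ≤ (m : Int) then s - (PySem.List.pyGet? vals ((m : Int) - k)).getD 0 else s
          (vals, s)) ([], 0)
      = ((List.range j).map (fun (m : Nat) => total_bitstrings_tp (m : Int) k memo),
         ((List.range' (j - k.toNat) (j - (j - k.toNat))).map
            (fun (m : Nat) => total_bitstrings_tp (m : Int) k memo)).sum) := by
  induction j with
  | zero => simp
  | succ j ih =>
      rw [List.range_succ, List.foldl_append, ih]
      simp only [List.foldl_cons, List.foldl_nil]
      -- the value pushed at step j is A's value at j
      have hval :
          (if (j : Int) < k then (2 : Int) ^ j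
           else (pvMemoGet? memo (j : Int) k).getD
                  ((List.range' (j - k.toNat) (j - (j - k.toNat))).map
                     (fun (m : Nat) => total_bitstrings_tp (m : Int) k memo)).sum)
            = total_bitstrings_tp (j : Int) k memo := by
        by_cases hm : (j : Int) < k
        · rw [totalA_base _ _ memo hm]
          simp [hm]
        · have hjk : k.toNat ≤ j := by omega
          simp only [hm, if_false]
          cases hfind : pvMemoGet? memo (j : Int) k with
          | some v => rw [totalA_memo _ _ memo v hm hfind]; simp
          | none =>
              rw [totalA_eq_sum _ _ memo hm hfind]
              simp only [Option.getD_none]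
              have hlen : j - (j - k.toNat) = k.toNat := by omega
              rw [hlen, pv_sum_map_range']
              rw [← Finset.sum_range_reflect]
              apply Finset.sum_congr rfl
              intro i hi
              have hik : i < k.toNat := Finset.mem_range.mp hi
              congr 1
              omega
      rw [hval]
      refine Prod.ext ?_ ?_
      · simp
      · -- the running sum moves to the window of range (j+1)
        simp only
        by_cases hkj : k ≤ (j : Int)
        · have hjk : k.toNat ≤ j := by omega
          simp only [hkj, if_true]
          -- the dropped element vals[j - k] is A's value at j - k.toNat
          have hidx : ((j : Int) - k) = ((j - k.toNat : Nat) : Int) := by omega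
          rw [hidx, PySem.List.pyGet?_natCast]
          rw [List.getElem?_append_left (by simp; omega), List.getElem?_map,
              List.getElem?_range (by omega)]
          simp only [Option.map_some, Option.getD_some]
          -- window arithmetic:  range' (j-k') k' = (j-k') :: range' (j-k'+1) (k'-1)
          have h1 : j - (j - k.toNat) = k.toNat := by omega
          have h2 : j + 1 - (j + 1 - k.toNat) = k.toNat := by omega
          rw [h1, h2]
          obtain ⟨c, hc⟩ : ∃ c, k.toNat = c + 1 := ⟨k.toNat - 1, by omega⟩
          rw [hc, List.range'_succ, List.range'_concat]
          have h3 : j + 1 - (c + 1) = j - c := by omega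
          have h4 : j - (c + 1) + 1 = j - c := by omega
          have h5 : j - c + 1 * c = j := by omega
          rw [h3, h4, h5]
          simp only [List.map_cons, List.sum_cons, List.map_append, List.sum_append,
            List.map_cons, List.map_nil, List.sum_cons, List.sum_nil]
          ring
        · -- j < k : the window is everything so far; nothing is dropped
          have hjk : j < k.toNat := by omega
          simp only [hkj, if_false]
          have h1 : j - k.toNat = 0 := by omega
          have h2 : j + 1 - k.toNat = 0 := by omega
          rw [h1, h2]
          simp only [Nat.sub_zero, List.range'_concat, Nat.zero_add, List.map_append,
            List.sum_append, List.map_cons, List.map_nil, List.sum_cons, List.sum_nil,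
            Nat.one_mul]
          ring

-- ===== VERDICT (by name: the statement is the Claim_ definition above) =====
theorem total_bitstrings_tp_spec : Claim_equal_total_bitstrings_tp := by
  intro n k memo _ _
  unfold Spec_total_bitstrings_tp total_bitstrings_tp_alt
  by_cases hnk : n < k
  · rw [totalA_base _ _ memo hnk]; simp [hnk]
  · simp only [hnk, if_false]
    cases hfind : pvMemoGet? memo n k with
    | some v => rw [totalA_memo _ _ memo v hnk hfind]
    | none =>
        by_cases hk0 : k ≤ 0
        · rw [totalA_eq_sum _ _ memo hnk hfind]
          have : k.toNat = 0 := by omega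
          simp [hk0, this]
        · simp only [hk0, if_false]
          have hk : 0 < k := by omega
          rw [vals_invariant k memo hk]
          have hn0 : 0 ≤ n := le_trans (le_of_lt hk) (not_lt.mp hnk)
          have hlt : n.toNat < (n + 1).toNat := by omega
          rw [List.getD_eq_getElem?_getD, List.getElem?_map]
          simp only [List.getElem?_range hlt, Option.map_some]
          have : ((n.toNat : Int)) = n := by omega
          rw [this]
          rfl
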